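-- pv_equiv track=rewrite | github.com/kyndsmiles421/ENLIGHTEN.MINT.CAGE | backend/routes/cardology.py | get_birth_card
-- ===== SOURCE A (Python) =====
-- SOLAR_VALUE_SUITS = [(1, 13, "H"), (14, 26, "C"), (27, 39, "D"), (40, 52, "S")]
--
-- def get_birth_card(month: int, day: int):
--     solar_value = 55 - (2 * month + day)
--     if solar_value <= 0:
--         return "JK"
--     if solar_value > 52:
--         return "JK"
--     for lo, hi, suit in SOLAR_VALUE_SUITS:
--         if lo <= solar_value <= hi:
--             val = solar_value - lo + 1
--             val_codes = {1: "A", 2: "2", 3: "3", 4: "4", 5: "5", 6: "6", 7: "7", 8: "8", 9: "9", 10: "10", 11: "J", 12: "Q", 13: "K"}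
--             return val_codes[val] + suit
--     return "JK"
-- ===== SOURCE B (Python) =====
-- def get_birth_card(month: int, day: int):
--     solar_value = 55 - (2 * month + day)
--     if solar_value <= 0 or solar_value > 52:
--         return "JK"
--     i = solar_value - 1
--     return ["A", "2", "3", "4", "5", "6", "7", "8", "9", "10", "J", "Q", "K"][i % 13] + "HCDS"[i // 13]
-- ===== Notes on version B (the rewrite author's own statement) =====
-- stated objective: simpler
-- what changed: Replaces the linear scan of suit ranges plus a per-call dict lookup with direct arithmetic indexing (i // 13 for the suit, i % 13 into an indexed value sequence).
import Mathlib
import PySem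

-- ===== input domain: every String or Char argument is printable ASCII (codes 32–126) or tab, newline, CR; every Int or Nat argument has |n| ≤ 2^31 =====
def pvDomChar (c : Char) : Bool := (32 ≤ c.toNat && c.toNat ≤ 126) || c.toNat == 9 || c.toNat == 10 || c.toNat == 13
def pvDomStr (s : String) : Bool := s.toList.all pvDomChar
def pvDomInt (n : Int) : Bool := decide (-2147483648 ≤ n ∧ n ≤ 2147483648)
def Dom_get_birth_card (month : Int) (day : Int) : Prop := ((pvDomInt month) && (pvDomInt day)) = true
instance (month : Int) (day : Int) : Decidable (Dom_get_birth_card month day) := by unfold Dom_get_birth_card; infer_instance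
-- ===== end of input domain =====

-- B replaces A's linear scan of suit ranges plus dict lookup with direct arithmetic indexing (i // 13, i % 13); objective: simpler.

-- ===== PORT A =====
def SOLAR_VALUE_SUITS : List (Int × Int × String) := [(1, 13, "H"), (14, 26, "C"), (27, 39, "D"), (40, 52, "S")]

def val_codes : PySem.Dict Int String :=
  PySem.Dict.ofList [(1, "A"), (2, "2"), (3, "3"), (4, "4"), (5, "5"), (6, "6"), (7, "7"), (8, "8"), (9, "9"), (10, "10"), (11, "J"), (12, "Q"), (13, "K")]

-- the for-loop over SOLAR_VALUE_SUITS, returning at the first matching range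
def get_birth_card_loop (solar_value : Int) : List (Int × Int × String) → String
  | [] => "JK"
  | (lo, hi, suit) :: rest =>
    if lo ≤ solar_value ∧ solar_value ≤ hi then
      let v := solar_value - lo + 1
      -- val_codes[v] : KeyError is unreachable here (1 ≤ v ≤ 13 whenever the branch fires)
      (val_codes.get? v).getD "" ++ suit
    else get_birth_card_loop solar_value rest

def get_birth_card (month : Int) (day : Int) : String :=
  let solar_value := 55 - (2 * month + day)
  if solar_value ≤ 0 then "JK"
  else if solar_value > 52 then "JK"
  else get_birth_card_loop solar_value SOLAR_VALUE_SUITS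

-- ===== PORT B =====
def get_birth_card_alt (month : Int) (day : Int) : String :=
  let solar_value := 55 - (2 * month + day)
  if solar_value ≤ 0 ∨ solar_value > 52 then "JK"
  else
    let i := solar_value - 1
    -- both indexings are in range whenever 1 ≤ solar_value ≤ 52, so the defaults are unreachable
    ((PySem.List.pyGet? ["A", "2", "3", "4", "5", "6", "7", "8", "9", "10", "J", "Q", "K"] (PySem.Int.mod i 13)).getD "")
      ++ ((PySem.Str.pyGet? "HCDS" (PySem.Int.floordiv i 13)).map String.singleton).getD ""

-- ===== PRECONDITION & SPEC =====
def Spec_get_birth_card (month : Int) (day : Int) (out : String) : Prop := out = get_birth_card_alt month day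
instance (month : Int) (day : Int) (out : String) : Decidable (Spec_get_birth_card month day out) := by unfold Spec_get_birth_card; infer_instance

-- ===== CLAIM (what is proved, stated in full; the proofs are below) =====
def Claim_equal_get_birth_card : Prop := ∀ (month : Int) (day : Int), Dom_get_birth_card month day → Spec_get_birth_card month day (get_birth_card month day)

-- ===== LEMMAS AND PROOFS =====

-- both programs depend on the input only through solar_value = 55 - (2*month + day)
def pvA (s : Int) : String :=
  if s ≤ 0 then "JK" else if s > 52 then "JK" else get_birth_card_loop s SOLAR_VALUE_SUITS

def pvB (s : Int) : String :=
  if s ≤ 0 ∨ s > 52 then "JK"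
  else
    let i := s - 1
    ((PySem.List.pyGet? ["A", "2", "3", "4", "5", "6", "7", "8", "9", "10", "J", "Q", "K"] (PySem.Int.mod i 13)).getD "")
      ++ ((PySem.Str.pyGet? "HCDS" (PySem.Int.floordiv i 13)).map String.singleton).getD ""

theorem pvA_eq (month day : Int) : get_birth_card month day = pvA (55 - (2 * month + day)) := rfl
theorem pvB_eq (month day : Int) : get_birth_card_alt month day = pvB (55 - (2 * month + day)) := rfl

theorem pv_eq (s : Int) : pvA s = pvB s := by
  by_cases h0 : s ≤ 0
  · simp [pvA, pvB, h0]
  · by_cases h52 : s > 52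
    · simp [pvA, pvB, h0, h52]
    · have h1 : 1 ≤ s := by omega
      have h2 : s ≤ 52 := by omega
      interval_cases s <;> decide

-- ===== VERDICT (by name: the statement is the Claim_ definition above) =====
theorem get_birth_card_spec : Claim_equal_get_birth_card := by
  intro month day _
  show get_birth_card month day = get_birth_card_alt month day
  rw [pvA_eq, pvB_eq, pv_eq]
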